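-- pv_equiv track=rewrite | github.com/Thiago13721/FAST-CHAT | produto_utils.py | identificar_produto_por_texto
-- ===== SOURCE A (Python) =====
-- def identificar_produto_por_texto(input_usuario, menu):
--     input_lower = input_usuario.lower()
--
--     # Criar uma lista de todos os aliases com o produto correspondente
--     # e ordená-los por tamanho (do mais longo para o mais curto)
--     # Isso garante que "pizza de calabresa" seja verificado antes de "calabresa"
--     all_aliases = []
--     for produto in menu:
--         for alias in produto.get("aliases", []):
--             all_aliases.append((alias.lower(), produto)) # Armazena o alias em minúsculas e o produto
--
--     # Ordena os aliases do mais longo para o mais curto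
--     all_aliases.sort(key=lambda x: len(x[0]), reverse=True)
--
--     for alias, produto in all_aliases:
--         # Verifica se o alias (agora em minúsculas) está na entrada do usuário
--         if alias in input_lower:
--             return produto
--
--     return None
-- ===== SOURCE B (Python) =====
-- def identificar_produto_por_texto(input_usuario, menu):
--     # Single pass over all aliases keeping the longest matching one (first wins on
--     # ties, which reproduces the stable reverse sort of the original): no list
--     # building and no sort.
--     input_lower = input_usuario.lower()
--     best = None  # (length of matching alias, produto)
--     for produto in menu:
--         for alias in produto.get("aliases", []):
--             al = alias.lower()
--             if (best is None or best[0] < len(al)) and al in input_lower: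
--                 best = (len(al), produto)
--     return best[1] if best is not None else None
-- ===== Notes on version B (the rewrite author's own statement) =====
-- stated objective: alternative
-- what changed: Replaces building and length-sorting the whole alias list followed by a scan with a single pass that tracks the longest matching alias (first occurrence wins ties, exactly what the stable reverse sort produced).
import Mathlib
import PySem

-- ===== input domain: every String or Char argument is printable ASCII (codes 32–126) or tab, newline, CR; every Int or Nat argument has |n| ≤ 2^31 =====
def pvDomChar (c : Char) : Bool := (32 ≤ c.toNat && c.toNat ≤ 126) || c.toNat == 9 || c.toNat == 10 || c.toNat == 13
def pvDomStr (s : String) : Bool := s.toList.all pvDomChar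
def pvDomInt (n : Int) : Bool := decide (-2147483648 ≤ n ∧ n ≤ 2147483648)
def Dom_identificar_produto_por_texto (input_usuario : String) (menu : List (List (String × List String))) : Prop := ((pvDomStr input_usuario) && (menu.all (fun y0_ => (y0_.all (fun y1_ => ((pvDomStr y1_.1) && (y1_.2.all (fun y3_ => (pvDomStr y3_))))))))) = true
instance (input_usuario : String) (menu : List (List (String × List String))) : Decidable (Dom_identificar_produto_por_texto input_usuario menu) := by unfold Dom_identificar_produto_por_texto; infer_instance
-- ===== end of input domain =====

-- B replaces "collect all alias_es, stable-sort by length descending, scan for the first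
-- substring match" by a single pass that keeps the longest matching alias_ (first one wins
-- on ties, which is what the stable reverse sort produced): no intermediate list, no sort.

-- ===== PORT A =====
def identificar_produto_por_texto (input_usuario : String) (menu : List (List (String × List String))) : Option (List (String × List String)) :=
  let input_lower := PySem.Str.lower input_usuario
  let all_aliases : List (String × List (String × List String)) :=
    menu.foldl (fun acc produto =>
      ((PySem.Dict.mk produto).getD "aliases" []).foldl
        (fun a alias_ => a ++ [(PySem.Str.lower alias_, produto)]) acc) []
  let sorted_aliases := PySem.List.sorted all_aliases (fun x => PySem.Str.len x.1) true
  (sorted_aliases.find? (fun x => PySem.Str.isIn x.1 input_lower)).map (fun x => x.2)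

-- ===== PORT B =====
def identificar_produto_por_texto_alt (input_usuario : String) (menu : List (List (String × List String))) : Option (List (String × List String)) :=
  let input_lower := PySem.Str.lower input_usuario
  let best : Option (Int × List (String × List String)) :=
    menu.foldl (fun b produto =>
      ((PySem.Dict.mk produto).getD "aliases" []).foldl
        (fun b alias_ =>
          let al := PySem.Str.lower alias_
          if (match b with | none => true | some q => decide (q.1 < PySem.Str.len al)) && PySem.Str.isIn al input_lower
          then some (PySem.Str.len al, produto) else b) b) none
  best.map (fun q => q.2)

-- ===== PRECONDITION & SPEC =====
def Spec_identificar_produto_por_texto (input_usuario : String) (menu : List (List (String × List String))) (out : Option (List (String × List String))) : Prop := out = identificar_produto_por_texto_alt input_usuario menu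
instance (input_usuario : String) (menu : List (List (String × List String))) (out : Option (List (String × List String))) : Decidable (Spec_identificar_produto_por_texto input_usuario menu out) := by unfold Spec_identificar_produto_por_texto; infer_instance

-- ===== CLAIM (what is proved, stated in full; the proofs are below) =====
def Claim_equal_identificar_produto_por_texto : Prop := ∀ (input_usuario : String) (menu : List (List (String × List String))), Dom_identificar_produto_por_texto input_usuario menu → Spec_identificar_produto_por_texto input_usuario menu (identificar_produto_por_texto input_usuario menu)

-- ===== LEMMAS AND PROOFS =====

-- A's selection step over full (lowered alias_, produto) pairs: keep the new pair exactly
-- when it matches and is strictly longer than the current best.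
def pvStepF (il : String) (b : Option (String × List (String × List String))) (x : String × List (String × List String)) : Option (String × List (String × List String)) :=
  if (match b with | none => true | some m => decide (PySem.Str.len m.1 < PySem.Str.len x.1)) && PySem.Str.isIn x.1 il then some x else b

-- B's step, on the projected state (length, produto).
def pvStepP (il : String) (b : Option (Int × List (String × List String))) (x : String × List (String × List String)) : Option (Int × List (String × List String)) :=
  if (match b with | none => true | some q => decide (q.1 < PySem.Str.len x.1)) && PySem.Str.isIn x.1 il then some (PySem.Str.len x.1, x.2) else b

-- the flattened (lowered alias_, produto) list both programs conceptually traverse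
def pvFlat (menu : List (List (String × List String))) : List (String × List (String × List String)) :=
  menu.flatMap (fun produto => ((PySem.Dict.mk produto).getD "aliases" []).map (fun alias_ => (PySem.Str.lower alias_, produto)))

lemma pv_find_insertBy (il : String) (x : String × List (String × List String)) :
    ∀ (S : List (String × List (String × List String))),
      S.Pairwise (fun a b => PySem.Str.len b.1 ≤ PySem.Str.len a.1) →
      (PySem.List.insertBy (fun a b => decide (PySem.Str.len b.1 < PySem.Str.len a.1)) x S).find?
          (fun y => PySem.Str.isIn y.1 il)
        = pvStepF il (S.find? (fun y => PySem.Str.isIn y.1 il)) x := by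
  intro S
  induction S with
  | nil =>
      intro _
      by_cases hp : PySem.Chars.isIn x.1.toList il.toList <;>
        simp [PySem.List.insertBy, pvStepF, List.find?, hp]
  | cons y ys ih =>
      intro hpw
      rw [List.pairwise_cons] at hpw
      rw [show PySem.List.insertBy (fun a b => decide (PySem.Str.len b.1 < PySem.Str.len a.1)) x (y :: ys)
            = if (decide (PySem.Str.len y.1 < PySem.Str.len x.1)) = true then x :: y :: ys
              else y :: PySem.List.insertBy (fun a b => decide (PySem.Str.len b.1 < PySem.Str.len a.1)) x ys from rfl]
      by_cases hcmp : PySem.Str.len y.1 < PySem.Str.len x.1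
      · rw [if_pos (by exact decide_eq_true hcmp)]
        by_cases hp : PySem.Chars.isIn x.1.toList il.toList
        · have hps : PySem.Str.isIn x.1 il = true := by simpa using hp
          have hrwx : List.find? (fun y => PySem.Str.isIn y.1 il) (x :: y :: ys) = some x :=
            List.find?_cons_of_pos hps
          rw [hrwx]
          rcases hfind : (y :: ys).find? (fun y => PySem.Str.isIn y.1 il) with _ | m
          · have hfindc : List.find? (fun y => PySem.Chars.isIn y.1.toList il.toList) (y :: ys) = none := by
              simpa using hfind
            simp [pvStepF, hp, hfindc]
          · have hfindc : List.find? (fun y => PySem.Chars.isIn y.1.toList il.toList) (y :: ys) = some m := by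
              simpa using hfind
            have hmem := List.mem_of_find?_eq_some hfind
            have hle : PySem.Str.len m.1 ≤ PySem.Str.len y.1 := by
              rcases List.mem_cons.mp hmem with h | h
              · simp [h]
              · exact hpw.1 m h
            have hlt : m.1.length < x.1.length := by
              have := lt_of_le_of_lt hle hcmp
              simpa [PySem.Str.len] using this
            simp [pvStepF, hp, hlt, hfindc]
        · have hps : ¬ PySem.Str.isIn x.1 il = true := by simpa using hp
          have hrw : List.find? (fun y => PySem.Str.isIn y.1 il) (x :: y :: ys)
              = List.find? (fun y => PySem.Str.isIn y.1 il) (y :: ys) :=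
            List.find?_cons_of_neg (fun h => hps h)
          rw [hrw]
          simp [pvStepF, hp]
      · rw [if_neg (by simpa using hcmp)]
        have hcmp' : ¬ y.1.length < x.1.length := by
          simpa [PySem.Str.len] using hcmp
        by_cases hpy : PySem.Chars.isIn y.1.toList il.toList
        · have hpys : PySem.Str.isIn y.1 il = true := by simpa using hpy
          have hrw1 : List.find? (fun y => PySem.Str.isIn y.1 il)
              (y :: PySem.List.insertBy (fun a b => decide (PySem.Str.len b.1 < PySem.Str.len a.1)) x ys)
              = some y := List.find?_cons_of_pos hpys
          have hrw2 : List.find? (fun y => PySem.Str.isIn y.1 il) (y :: ys) = some y :=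
            List.find?_cons_of_pos hpys
          rw [hrw1, hrw2]
          simp [pvStepF, hcmp']
        · have hpys : ¬ PySem.Str.isIn y.1 il = true := by simpa using hpy
          have hrw1 : List.find? (fun y => PySem.Str.isIn y.1 il)
              (y :: PySem.List.insertBy (fun a b => decide (PySem.Str.len b.1 < PySem.Str.len a.1)) x ys)
              = List.find? (fun y => PySem.Str.isIn y.1 il)
                  (PySem.List.insertBy (fun a b => decide (PySem.Str.len b.1 < PySem.Str.len a.1)) x ys) :=
            List.find?_cons_of_neg (fun h => hpys h)
          have hrw2 : List.find? (fun y => PySem.Str.isIn y.1 il) (y :: ys)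
              = List.find? (fun y => PySem.Str.isIn y.1 il) ys :=
            List.find?_cons_of_neg (fun h => hpys h)
          rw [hrw1, hrw2]
          exact ih hpw.2

lemma pv_find_sorted (il : String) :
    ∀ (L : List (String × List (String × List String))),
      (PySem.List.sorted L (fun x => PySem.Str.len x.1) true).find? (fun y => PySem.Str.isIn y.1 il)
        = L.foldl (pvStepF il) none := by
  intro L
  induction L using List.reverseRecOn with
  | nil => rfl
  | append_singleton L x ih =>
      rw [PySem.List.sorted_rev_eq_foldl_insertBy, List.foldl_append, List.foldl_cons, List.foldl_nil,
        ← PySem.List.sorted_rev_eq_foldl_insertBy]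
      rw [pv_find_insertBy il x _ (PySem.List.sorted_pairwise_rev L (fun x => PySem.Str.len x.1))]
      rw [ih, List.foldl_append, List.foldl_cons, List.foldl_nil]

lemma pv_proj (il : String) :
    ∀ (L : List (String × List (String × List String))) (b0 : Option (String × List (String × List String))),
      (L.foldl (pvStepF il) b0).map (fun x => (PySem.Str.len x.1, x.2))
        = L.foldl (pvStepP il) (b0.map (fun x => (PySem.Str.len x.1, x.2))) := by
  intro L
  induction L with
  | nil => intro b0; rfl
  | cons x L ih =>
      intro b0
      rw [List.foldl_cons, List.foldl_cons, ih]
      congr 1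
      cases b0 with
      | none =>
          by_cases hp : PySem.Chars.isIn x.1.toList il.toList <;> simp [pvStepF, pvStepP, hp]
      | some m =>
          by_cases hp : PySem.Chars.isIn x.1.toList il.toList <;>
            by_cases hlt : m.1.length < x.1.length <;>
              simp [pvStepF, pvStepP, hp, hlt]

lemma pv_buildA :
    ∀ (menu : List (List (String × List String))) (acc : List (String × List (String × List String))),
      menu.foldl (fun acc produto =>
          ((PySem.Dict.mk produto).getD "aliases" []).foldl
            (fun a alias_ => a ++ [(PySem.Str.lower alias_, produto)]) acc) acc
        = acc ++ pvFlat menu := by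
  intro menu
  induction menu with
  | nil => intro acc; simp [pvFlat]
  | cons produto rest ih =>
      intro acc
      rw [List.foldl_cons, ih, PySem.List.foldl_append_singleton_eq_map]
      simp [pvFlat, List.flatMap_cons]

lemma pv_buildB (il : String) :
    ∀ (menu : List (List (String × List String))) (b0 : Option (Int × List (String × List String))),
      menu.foldl (fun b produto =>
          ((PySem.Dict.mk produto).getD "aliases" []).foldl
            (fun b alias_ =>
              if (match b with | none => true | some q => decide (q.1 < PySem.Str.len (PySem.Str.lower alias_))) && PySem.Str.isIn (PySem.Str.lower alias_) il
              then some (PySem.Str.len (PySem.Str.lower alias_), produto) else b) b) b0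
        = (pvFlat menu).foldl (pvStepP il) b0 := by
  intro menu
  induction menu with
  | nil => intro b0; rfl
  | cons produto rest ih =>
      intro b0
      rw [List.foldl_cons, ih]
      simp only [pvFlat, List.flatMap_cons, List.foldl_append, List.foldl_map]
      rfl

lemma pv_main (input_usuario : String) (menu : List (List (String × List String))) :
    identificar_produto_por_texto input_usuario menu = identificar_produto_por_texto_alt input_usuario menu := by
  simp only [identificar_produto_por_texto, identificar_produto_por_texto_alt]
  rw [pv_buildA menu [], List.nil_append, pv_buildB (PySem.Str.lower input_usuario) menu none,
    pv_find_sorted (PySem.Str.lower input_usuario) (pvFlat menu)]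
  rw [show (none : Option (Int × List (String × List String))) = (none : Option (String × List (String × List String))).map (fun x => (PySem.Str.len x.1, x.2)) from rfl,
    ← pv_proj (PySem.Str.lower input_usuario) (pvFlat menu) none]
  cases (pvFlat menu).foldl (pvStepF (PySem.Str.lower input_usuario)) none <;> rfl

-- ===== VERDICT (by name: the statement is the Claim_ definition above) =====
theorem identificar_produto_por_texto_spec : Claim_equal_identificar_produto_por_texto := by
  intro input_usuario menu _
  unfold Spec_identificar_produto_por_texto
  exact pv_main input_usuario menu
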